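-- pv_equiv track=rewrite | github.com/poshut/bwinf37-runde1 | a2-Twist/Implementierung/twist.py | woerterbuch_erstellen
-- ===== SOURCE A (Python) =====
-- def wort_zu_schluessel(wort):
--     # Sortiere mittlere Buchstaben des Worts
--     mittlere_buchstaben = ''.join(sorted(list(wort[1:-1])))
--     return wort[0].lower() + mittlere_buchstaben + wort[-1].lower()
--
-- def woerterbuch_erstellen(woerter_liste):
--     woerterbuch = {}
--     for wort in woerter_liste:
--         if wort != '':
--             schluessel = wort_zu_schluessel(wort)
--             if schluessel not in woerterbuch:
--                 woerterbuch[schluessel] = []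
--             woerterbuch[schluessel].append(wort)
--     return woerterbuch
-- ===== SOURCE B (Python) =====
-- def wort_zu_schluessel(wort):
--     # Sortiere mittlere Buchstaben des Worts
--     mittlere_buchstaben = ''.join(sorted(list(wort[1:-1])))
--     return wort[0].lower() + mittlere_buchstaben + wort[-1].lower()
--
-- def woerterbuch_erstellen(woerter_liste):
--     paare = [(wort_zu_schluessel(wort), wort) for wort in woerter_liste if wort != '']
--     schluessel_liste = dict.fromkeys(s for s, _ in paare)
--     return {s: [wort for t, wort in paare if t == s] for s in schluessel_liste}
-- ===== Notes on version B (the rewrite author's own statement) =====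
-- stated objective: alternative
-- what changed: Replaces A's single forward loop that mutates the result dict in place (membership test, bucket creation, append) by a declarative pipeline: pair each non-empty word with its key once, collect the distinct keys in first-occurrence order with dict.fromkeys, then build each group with one filtering comprehension per key.
import Mathlib
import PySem

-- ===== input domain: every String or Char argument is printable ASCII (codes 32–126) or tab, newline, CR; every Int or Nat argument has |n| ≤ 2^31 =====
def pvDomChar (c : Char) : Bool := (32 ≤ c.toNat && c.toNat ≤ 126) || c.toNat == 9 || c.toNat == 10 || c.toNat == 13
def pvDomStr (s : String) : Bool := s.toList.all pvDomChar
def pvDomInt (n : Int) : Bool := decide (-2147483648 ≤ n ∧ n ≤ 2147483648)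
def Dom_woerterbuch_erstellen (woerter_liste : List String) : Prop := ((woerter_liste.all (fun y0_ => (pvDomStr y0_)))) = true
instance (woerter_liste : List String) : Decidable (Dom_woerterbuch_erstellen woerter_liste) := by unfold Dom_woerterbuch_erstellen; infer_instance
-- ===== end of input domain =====

-- B replaces A's incremental dict mutation by a declarative two-stage grouping: distinct keys in
-- first-occurrence order, then a key/word pair list and one filtering pass per key (an 'alternative' decomposition, not faster).

-- ===== PORT A =====
-- shared helper of both Pythons: wort_zu_schluessel (always called on a non-empty word;
-- wort[0] / wort[-1] are ported as the one-character slices wort[0:1] / wort[-1:], exact for wort ≠ "")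
def wort_zu_schluessel (wort : String) : String :=
  let cs := wort.toList
  let mittlere_buchstaben := PySem.List.sorted (PySem.List.slice cs (some 1) (some (-1))) (fun c => c) false
  String.ofList (PySem.Chars.lower (PySem.List.slice cs none (some 1)) ++ mittlere_buchstaben
             ++ PySem.Chars.lower (PySem.List.slice cs (some (-1)) none))

def woerterbuch_erstellen (woerter_liste : List String) : List (String × List String) :=
  (woerter_liste.foldl
    (fun (d : PySem.Dict String (List String)) wort =>
      if wort ≠ "" then
        let schluessel := wort_zu_schluessel wort
        let d' := if d.contains schluessel then d else d.insert schluessel ([] : List String)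
        d'.modify schluessel [] (fun l => l ++ [wort])
      else d)
    PySem.Dict.empty).items

-- ===== PORT B =====
def woerterbuch_erstellen_alt (woerter_liste : List String) : List (String × List String) :=
  let paare := (woerter_liste.filter (fun wort => decide (wort ≠ ""))).map
    (fun wort => (wort_zu_schluessel wort, wort))
  let schluessel_liste := PySem.List.dedup (paare.map (fun p => p.1))
  schluessel_liste.map (fun s => (s, (paare.filter (fun p => p.1 == s)).map (fun p => p.2)))

-- ===== PRECONDITION & SPEC =====
def Spec_woerterbuch_erstellen (woerter_liste : List String) (out : List (String × List String)) : Prop := out = woerterbuch_erstellen_alt woerter_liste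
instance (woerter_liste : List String) (out : List (String × List String)) : Decidable (Spec_woerterbuch_erstellen woerter_liste out) := by unfold Spec_woerterbuch_erstellen; infer_instance

-- ===== CLAIM (what is proved, stated in full; the proofs are below) =====
def Claim_equal_woerterbuch_erstellen : Prop := ∀ (woerter_liste : List String), Dom_woerterbuch_erstellen woerter_liste → Spec_woerterbuch_erstellen woerter_liste (woerterbuch_erstellen woerter_liste)

-- ===== LEMMAS AND PROOFS =====

-- the non-empty words of ws, each paired with its key
def pvPairs (ws : List String) : List (String × String) :=
  (ws.filter (fun wort => decide (wort ≠ ""))).map (fun w => (wort_zu_schluessel w, w))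

-- the common canonical form both ports are reduced to
def pvCanon (ws : List String) : List (String × List String) :=
  (PySem.List.dedup ((pvPairs ws).map Prod.fst)).map
    (fun k => (k, ((pvPairs ws).filter (fun p => p.1 == k)).map Prod.snd))

-- A's body for one word: 'if new key insert empty bucket, then append' is one Dict.modify
theorem stepA_eq_modify (d : PySem.Dict String (List String)) (w : String) :
    (if d.contains (wort_zu_schluessel w) then d
     else d.insert (wort_zu_schluessel w) ([] : List String)).modify
      (wort_zu_schluessel w) [] (fun l => l ++ [w])
    = d.modify (wort_zu_schluessel w) [] (fun l => l ++ [w]) := by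
  by_cases h : d.contains (wort_zu_schluessel w) = true
  · simp [h]
  · simp only [Bool.not_eq_true] at h
    simp [h, PySem.Dict.modify, PySem.Dict.getD_insert_self,
      PySem.Dict.insert_insert_self, PySem.Dict.getD_of_not_contains d _ h]

-- a guarded modify-append loop over a word list, reduced to a loop over the key/word pairs
theorem foldl_guarded (ws : List String) :
    ws.foldl (fun (d : PySem.Dict String (List String)) w =>
        if w ≠ "" then d.modify (wort_zu_schluessel w) [] (fun l => l ++ [w]) else d)
      PySem.Dict.empty
    = (pvPairs ws).foldl (fun d p => d.modify p.1 [] (fun l => l ++ [p.2]))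
        PySem.Dict.empty := by
  rw [PySem.List.foldl_ite_eq_foldl_filter (p := fun w => w ≠ "")]
  exact (List.foldl_map (f := fun w => (wort_zu_schluessel w, w))
    (g := fun (d : PySem.Dict String (List String)) p => d.modify p.1 [] (fun l => l ++ [p.2]))
    (l := ws.filter (fun wort => decide (wort ≠ ""))) (init := PySem.Dict.empty)).symm

-- the grouping dict of a pair list, read back as items
theorem items_grouping (l : List (String × String)) :
    (l.foldl (fun (d : PySem.Dict String (List String)) p =>
        d.modify p.1 [] (fun x => x ++ [p.2])) PySem.Dict.empty).items
    = (PySem.List.dedup (l.map Prod.fst)).map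
        (fun k => (k, (l.filter (fun p => p.1 == k)).map Prod.snd)) := by
  set D := l.foldl (fun (d : PySem.Dict String (List String)) p =>
      d.modify p.1 [] (fun x => x ++ [p.2])) PySem.Dict.empty with hD
  have hnodup : D.keys.Nodup :=
    PySem.Dict.nodup_keys_foldl_modify_key l Prod.fst []
      (fun _ p => fun x => x ++ [p.2]) PySem.Dict.empty (by simp)
  have hkeys : D.keys = PySem.List.dedup (l.map Prod.fst) := by
    rw [hD, PySem.Dict.keys_foldl_modify_key l Prod.fst []
      (fun _ p => fun x => x ++ [p.2]) PySem.Dict.empty]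
    simp [PySem.List.dedup_eq_ofList, PySem.Set.update, PySem.Set.ofList_eq_foldl]
  rw [PySem.Dict.items_eq_map_keys D hnodup [], hkeys]
  refine List.map_congr_left ?_
  intro k _
  have := PySem.Dict.getD_foldl_modify_append l PySem.Dict.empty k
  simp only [PySem.Dict.getD_empty, List.nil_append] at this
  rw [← hD] at this
  simp [this]

theorem A_canon (ws : List String) : woerterbuch_erstellen ws = pvCanon ws := by
  unfold woerterbuch_erstellen pvCanon
  have hcongr : ∀ (d : PySem.Dict String (List String)), ∀ w ∈ ws,
      (if w ≠ "" then
        (if d.contains (wort_zu_schluessel w) then d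
         else d.insert (wort_zu_schluessel w) ([] : List String)).modify
          (wort_zu_schluessel w) [] (fun l => l ++ [w])
       else d)
      = (if w ≠ "" then d.modify (wort_zu_schluessel w) [] (fun l => l ++ [w]) else d) := by
    intro d w _
    by_cases hw : w = "" <;> simp [hw, stepA_eq_modify]
  rw [PySem.List.foldl_congr_mem ws _ _ _ hcongr, foldl_guarded, items_grouping]

theorem B_canon (ws : List String) : woerterbuch_erstellen_alt ws = pvCanon ws := rfl

-- ===== VERDICT (by name: the statement is the Claim_ definition above) =====
theorem woerterbuch_erstellen_spec : Claim_equal_woerterbuch_erstellen := by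
  intro ws _
  unfold Spec_woerterbuch_erstellen
  rw [A_canon, B_canon]
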